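-- pv_equiv track=rewrite | github.com/AryanBogam/Python-Challenge | day_32/problem_04/solution.py | categorize_sentiment
-- ===== SOURCE A (Python) =====
-- def categorize_sentiment(tweet):
--     positive_words = ["love", "great", "awesome"]
--     negative_words = ["hate", "bad", "terrible"]
--
--     words = tweet.lower().split()
--     for word in words:
--         if word in positive_words:
--             return "positive"
--
--     for word in words:
--         if word in negative_words:
--             return "negative"
--
--     return "neutral"
-- ===== SOURCE B (Python) =====
-- def categorize_sentiment(tweet):
--     # Single pass: return "positive" immediately on a positive word (preserves
--     # positive-over-negative priority); remember negatives in a flag.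
--     found_negative = False
--     for word in tweet.lower().split():
--         if word in ("love", "great", "awesome"):
--             return "positive"
--         if word in ("hate", "bad", "terrible"):
--             found_negative = True
--     return "negative" if found_negative else "neutral"
-- ===== Notes on version B (the rewrite author's own statement) =====
-- stated objective: alternative
-- what changed: Replaces A's two sequential scans over the word list by a single flag-carrying pass that returns the positive label early and checks the negative flag only after the loop.
import Mathlib
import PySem

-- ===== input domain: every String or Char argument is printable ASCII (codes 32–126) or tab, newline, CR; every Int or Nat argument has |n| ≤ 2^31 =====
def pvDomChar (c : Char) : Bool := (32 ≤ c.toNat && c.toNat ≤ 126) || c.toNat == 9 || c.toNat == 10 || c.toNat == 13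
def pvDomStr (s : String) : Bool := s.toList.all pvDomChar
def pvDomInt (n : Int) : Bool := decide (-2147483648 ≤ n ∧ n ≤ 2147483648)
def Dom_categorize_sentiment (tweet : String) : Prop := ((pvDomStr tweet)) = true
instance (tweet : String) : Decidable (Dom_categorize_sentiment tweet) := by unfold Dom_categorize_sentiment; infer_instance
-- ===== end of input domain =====

-- B replaces A's two sequential scans by a single flag-carrying pass (same value, positive priority preserved).

-- ===== PORT A =====
-- first for-loop of A: early return "positive" on a positive word
def pvALoopPos : List String → Option String
  | [] => none
  | w :: ws => if w ∈ ["love", "great", "awesome"] then some "positive" else pvALoopPos ws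

-- second for-loop of A: early return "negative" on a negative word
def pvALoopNeg : List String → Option String
  | [] => none
  | w :: ws => if w ∈ ["hate", "bad", "terrible"] then some "negative" else pvALoopNeg ws

def categorize_sentiment (tweet : String) : String :=
  let words := PySem.Str.split₀ (PySem.Str.lower tweet)
  match pvALoopPos words with
  | some r => r
  | none =>
    match pvALoopNeg words with
    | some r => r
    | none => "neutral"

-- ===== PORT B =====
-- B's single loop carrying the found_negative flag
def pvBLoop : List String → Bool → String
  | [], flag => if flag then "negative" else "neutral"
  | w :: ws, flag =>
    if w ∈ ["love", "great", "awesome"] then "positive"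
    else pvBLoop ws (flag || decide (w ∈ ["hate", "bad", "terrible"]))

def categorize_sentiment_alt (tweet : String) : String :=
  pvBLoop (PySem.Str.split₀ (PySem.Str.lower tweet)) false

-- ===== PRECONDITION & SPEC =====
def Spec_categorize_sentiment (tweet : String) (out : String) : Prop := out = categorize_sentiment_alt tweet
instance (tweet : String) (out : String) : Decidable (Spec_categorize_sentiment tweet out) := by unfold Spec_categorize_sentiment; infer_instance

-- ===== CLAIM (what is proved, stated in full; the proofs are below) =====
def Claim_equal_categorize_sentiment : Prop := ∀ (tweet : String), Dom_categorize_sentiment tweet → Spec_categorize_sentiment tweet (categorize_sentiment tweet)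

-- ===== LEMMAS AND PROOFS =====
lemma pvALoopNeg_cases (ws : List String) : pvALoopNeg ws = none ∨ pvALoopNeg ws = some "negative" := by
  induction ws with
  | nil => left; rfl
  | cons w ws ih =>
    by_cases h : w ∈ ["hate", "bad", "terrible"]
    · right; simp [pvALoopNeg, h]
    · simpa [pvALoopNeg, h] using ih

lemma pvBLoop_eq (ws : List String) (flag : Bool) :
    pvBLoop ws flag =
      match pvALoopPos ws with
      | some r => r
      | none => if flag || (pvALoopNeg ws).isSome then "negative" else "neutral" := by
  induction ws generalizing flag with
  | nil => cases flag <;> rfl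
  | cons w ws ih =>
    by_cases h : w ∈ ["love", "great", "awesome"]
    · simp [pvBLoop, pvALoopPos, h]
    · by_cases hn : w ∈ ["hate", "bad", "terrible"] <;>
        simp [pvBLoop, pvALoopPos, pvALoopNeg, h, hn, ih]

-- ===== VERDICT (by name: the statement is the Claim_ definition above) =====
theorem categorize_sentiment_spec : Claim_equal_categorize_sentiment := by
  intro tweet _
  unfold Spec_categorize_sentiment categorize_sentiment categorize_sentiment_alt
  set ws := PySem.Str.split₀ (PySem.Str.lower tweet) with hws
  rw [pvBLoop_eq]
  cases hp : pvALoopPos ws with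
  | some r => simp [hp]
  | none =>
    rcases pvALoopNeg_cases ws with hn | hn <;> simp [hp, hn]
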